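-- pv_equiv track=rewrite | github.com/sarishtshreshth0/plag_extract | Project_CodeNet_Python800/p03104/s861462496.py | calc
-- ===== SOURCE A (Python) =====
-- def calc(a):
--     if a < 0:
--         return 0
--     ans = 0
--     for i in range(50):
--         loop = 2 ** (i+1)
--         cnt = (a // loop) * (loop // 2)
--         cnt += max(0, a % loop+1 - loop // 2)
--         if cnt % 2 == 1:
--             ans += 2 ** i
--     return ans
-- ===== SOURCE B (Python) =====
-- def calc(a):
--     # closed form for XOR of 0..a (per-bit parity), no loop
--     if a < 0:
--         return 0
--     r = a % 4
--     if r == 0: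
--         return a
--     if r == 1:
--         return 1
--     if r == 2:
--         return a + 1
--     return 0
-- ===== Notes on version B (the rewrite author's own statement) =====
-- stated objective: simpler
-- what changed: Replaced the fixed 50-iteration per-bit parity loop with the loop-free closed form for XOR of 0..a selected by the residue of a modulo 4 (a, 1, a+1, 0).
import Mathlib
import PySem

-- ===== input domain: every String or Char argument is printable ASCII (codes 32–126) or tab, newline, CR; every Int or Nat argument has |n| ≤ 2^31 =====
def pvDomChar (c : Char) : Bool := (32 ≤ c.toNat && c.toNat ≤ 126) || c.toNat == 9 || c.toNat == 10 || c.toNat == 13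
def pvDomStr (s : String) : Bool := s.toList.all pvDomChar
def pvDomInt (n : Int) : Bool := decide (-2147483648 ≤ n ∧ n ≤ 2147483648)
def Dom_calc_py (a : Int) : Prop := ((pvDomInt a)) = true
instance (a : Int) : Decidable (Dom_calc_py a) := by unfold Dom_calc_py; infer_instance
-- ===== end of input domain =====

-- B replaces A's 50-iteration per-bit parity loop by the closed form for XOR of 0..a chosen by a % 4.

-- ===== PORT A =====
def calc_py (a : Int) : Int :=
  if a < 0 then 0
  else
    -- for i in range(50): loop = 2**(i+1); cnt = (a//loop)*(loop//2); cnt += max(0, a%loop+1-loop//2); if cnt%2==1: ans += 2**i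
    (PySem.List.pyRange 0 50 1).foldl (fun ans i =>
      let loop : Int := 2 ^ (i + 1).toNat   -- i ∈ [0,49], so (i+1).toNat = i+1 exactly
      let cnt : Int := PySem.Int.floordiv a loop * PySem.Int.floordiv loop 2
      let cnt := cnt + max 0 (PySem.Int.mod a loop + 1 - PySem.Int.floordiv loop 2)
      if PySem.Int.mod cnt 2 = 1 then ans + 2 ^ i.toNat else ans) 0

-- ===== PORT B =====
def calc_py_alt (a : Int) : Int :=
  if a < 0 then 0
  else
    let r := PySem.Int.mod a 4
    if r = 0 then a
    else if r = 1 then 1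
    else if r = 2 then a + 1
    else 0

-- ===== PRECONDITION & SPEC =====
def Spec_calc_py (a : Int) (out : Int) : Prop := out = calc_py_alt a
instance (a : Int) (out : Int) : Decidable (Spec_calc_py a out) := by unfold Spec_calc_py; infer_instance

-- ===== CLAIM (what is proved, stated in full; the proofs are below) =====
def Claim_equal_calc_py : Prop := ∀ (a : Int), Dom_calc_py a → Spec_calc_py a (calc_py a)

-- ===== LEMMAS AND PROOFS =====

-- contribution of bit i of A's loop, for a ≥ 0 (floordiv/mod already rewritten to ediv/emod)
def pvC (a : Int) (i : Nat) : Int :=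
  if (a / 2 ^ (i + 1) * 2 ^ i + max 0 (a % 2 ^ (i + 1) + 1 - 2 ^ i)) % 2 = 1 then 2 ^ i else 0

-- a fold that only adds g x to the accumulator is the sum of the g's
lemma pvFoldl_eq_add_sum {α : Type} (f : Int → α → Int) (g : α → Int)
    (hf : ∀ (acc : Int) (x : α), f acc x = acc + g x) :
    ∀ (l : List α) (init : Int), l.foldl f init = init + (l.map g).sum := by
  intro l
  induction l with
  | nil => intro init; simp
  | cons x xs ih =>
    intro init
    simp only [List.foldl_cons, List.map_cons, List.sum_cons, hf]
    rw [ih]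
    ring

-- bit k+1 contributes 2^(k+1) exactly when a is even and bit k+1 of a is set
lemma pvC_succ (a : Int) (k : Nat) :
    pvC a (k + 1) = if a % 2 = 0 then a % 2 ^ (k + 1 + 1) - a % 2 ^ (k + 1) else 0 := by
  unfold pvC
  have hL : (2:Int) ^ (k + 1 + 1) = 2 * 2 ^ (k + 1) := by ring
  rw [hL]
  set P : Int := 2 ^ (k + 1) with hPdef
  have hP : (0:Int) < P := by positivity
  obtain ⟨H', hH', hH'pos⟩ : ∃ H' : Int, P = 2 * H' ∧ 0 < H' :=
    ⟨2 ^ k, by rw [hPdef]; ring, by positivity⟩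
  set q : Int := a / (2 * P) with hqdef
  set r : Int := a % (2 * P) with hrdef
  have ha2 : 2 * P * q + r = a := by rw [hqdef, hrdef]; exact Int.ediv_add_emod a (2 * P)
  have hr0 : 0 ≤ r := Int.emod_nonneg a (by omega)
  have hr1 : r < 2 * P := Int.emod_lt_of_pos a (by omega)
  have hmodP : a % P = r % P := by
    rw [hrdef]; exact (Int.emod_emod_of_dvd a ⟨2, by ring⟩).symm
  have hrP : r % P = if r < P then r else r - P := by
    split_ifs with h
    · exact Int.emod_eq_of_lt hr0 h
    · have h1 : (r - P) % P = r % P := by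
        conv_rhs => rw [show r = (r - P) + P * 1 by ring]
        rw [Int.add_mul_emod_self_left]
      rw [← h1, Int.emod_eq_of_lt (by omega) (by omega)]
  have h2 : a % 2 = r % 2 := by
    conv_lhs => rw [show a = r + 2 * (P * q) by rw [← ha2]; ring]
    rw [Int.add_mul_emod_self_left]
  have hmax : max (0:Int) (r + 1 - P) = if P ≤ r then r + 1 - P else 0 := by
    split_ifs with h
    · exact max_eq_right (by omega)
    · exact max_eq_left (by omega)
  have hcnt : (q * P + max 0 (r + 1 - P)) % 2 = (max 0 (r + 1 - P)) % 2 := by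
    conv_lhs => rw [show q * P + max 0 (r + 1 - P) = max 0 (r + 1 - P) + 2 * (q * H') by rw [hH']; ring]
    rw [Int.add_mul_emod_self_left]
  rw [hcnt, hmax, hmodP, hrP]
  split_ifs <;> omega

-- partial sums of A's bit contributions, in closed form
lemma pvSum (a : Int) : ∀ (k : Nat), 1 ≤ k →
    ((List.range k).map (pvC a)).sum
      = pvC a 0 + (if a % 2 = 0 then a % 2 ^ k - a % 2 else 0) := by
  intro k
  induction k with
  | zero => omega
  | succ n ih =>
    intro _
    rcases Nat.lt_or_ge n 1 with h1 | h1
    · have hn : n = 0 := by omega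
      subst hn
      simp only [Nat.zero_add, List.range_one, List.map_cons, List.map_nil, List.sum_cons,
        List.sum_nil, add_zero, pow_one]
      split_ifs <;> omega
    · obtain ⟨m, rfl⟩ : ∃ m, n = m + 1 := ⟨n - 1, by omega⟩
      rw [List.range_succ, List.map_append, List.sum_append, ih (by omega)]
      simp only [List.map_cons, List.map_nil, List.sum_cons, List.sum_nil, add_zero]
      rw [pvC_succ a m]
      split_ifs <;> ring

-- the fold of port A, for a ≥ 0, is the sum of the 50 bit contributions
lemma calc_py_eq_sum (a : Int) (ha : 0 ≤ a) :
    calc_py a = ((List.range 50).map (pvC a)).sum := by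
  have hrange : PySem.List.pyRange 0 50 1 = (List.range 50).map (fun k : Nat => (k : Int)) := by
    decide
  unfold calc_py
  rw [if_neg (by omega), hrange, List.foldl_map]
  have hstep : ∀ (ans : Int) (i : Nat),
      (let loop : Int := 2 ^ (((i : Int)) + 1).toNat
       let cnt : Int := PySem.Int.floordiv a loop * PySem.Int.floordiv loop 2
       let cnt := cnt + max 0 (PySem.Int.mod a loop + 1 - PySem.Int.floordiv loop 2)
       if PySem.Int.mod cnt 2 = 1 then ans + 2 ^ ((i : Int)).toNat else ans)
      = ans + pvC a i := by
    intro ans i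
    have hi1 : (((i : Int)) + 1).toNat = i + 1 := by omega
    have hiN : ((i : Int)).toNat = i := by omega
    simp only [hi1, hiN]
    have hpow : (0:Int) < 2 ^ (i + 1) := by positivity
    rw [PySem.Int.floordiv_eq_ediv_of_pos hpow, PySem.Int.mod_eq_emod_of_pos hpow,
        PySem.Int.floordiv_eq_ediv_of_pos (show (0:Int) < 2 from by norm_num)]
    have hhalf : (2:Int) ^ (i + 1) / 2 = 2 ^ i := by
      rw [pow_succ, Int.mul_ediv_cancel _ (by norm_num)]
    rw [hhalf, PySem.Int.mod_eq_emod_of_pos (show (0:Int) < 2 from by norm_num)]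
    unfold pvC
    split_ifs <;> ring
  rw [pvFoldl_eq_add_sum _ (pvC a) (fun acc x => hstep acc x) (List.range 50) 0]
  ring

-- ===== VERDICT (by name: the statement is the Claim_ definition above) =====
theorem calc_py_spec : Claim_equal_calc_py := by
  intro a hdom
  unfold Spec_calc_py calc_py_alt
  by_cases ha : a < 0
  · rw [if_pos ha]
    unfold calc_py
    rw [if_pos ha]
  · have ha' : 0 ≤ a := by omega
    rw [if_neg ha]
    rw [calc_py_eq_sum a ha', pvSum a 50 (by omega)]
    have hdom' : a ≤ 2147483648 := by
      unfold Dom_calc_py pvDomInt at hdom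
      exact (of_decide_eq_true hdom).2
    have h50 : a % 2 ^ 50 = a := Int.emod_eq_of_lt ha' (by norm_num; omega)
    have hm4 : PySem.Int.mod a 4 = a % 4 := PySem.Int.mod_eq_emod_of_pos (by norm_num)
    have hc0 : pvC a 0 = if (a / 2 + a % 2) % 2 = 1 then 1 else 0 := by
      unfold pvC
      norm_num
      split_ifs <;> omega
    rw [h50, hc0]
    show _ = if PySem.Int.mod a 4 = 0 then a
      else if PySem.Int.mod a 4 = 1 then 1
      else if PySem.Int.mod a 4 = 2 then a + 1 else 0
    rw [hm4]
    split_ifs <;> omega
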